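-- pv_equiv track=rewrite | github.com/Carson7822/Python-Fundamentals-CSE174 | Projects/project_3.py | put_together
-- ===== SOURCE A (Python) =====
-- def put_together(inp: str) -> str:
--     """
--     This function takes a string of letters and numbers and puts them all
--     of the same letters and numbers together.
--
--     Args:
--         (inp) The string that is plugged into the function
--     Returns:
--         (new_string) The new string with all of the letters and numbers
--         together
--     """
--     new_string = ''
--     string_check = inp
--
--     if not inp:
--         return ''
--
--
--     loop_length = len(inp)
--
--     for i in range(loop_length):
--         if string_check[0] == '1':
--             new_string += string_check[0]
--         string_check = string_check[1:]
--
--     string_check = inp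
--     for i in range(loop_length):
--         if string_check[0] == 'a':
--             new_string += string_check[0]
--         string_check = string_check[1:]
--
--     string_check = inp
--     for i in range(loop_length):
--         if string_check[0] == 'c':
--             new_string += string_check[0]
--         string_check = string_check[1:]
--
--     string_check = inp
--     for i in range(loop_length):
--         if string_check[0] == 'w':
--             new_string += string_check[0]
--         string_check = string_check[1:]
--
--     string_check = inp
--     for i in range(loop_length):
--         if string_check[0] == '2':
--             new_string += string_check[0]
--         string_check = string_check[1:]
--
--     string_check = inp
--     for i in range(loop_length):
--         if string_check[0] == 'g':
--             new_string += string_check[0]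
--         string_check = string_check[1:]
--
--     string_check = inp
--     for i in range(loop_length):
--         if string_check[0] == 'd':
--             new_string += string_check[0]
--         string_check = string_check[1:]
--
--     string_check = inp
--     for i in range(loop_length):
--         if string_check[0] == 'm':
--             new_string += string_check[0]
--         string_check = string_check[1:]
--
--     return new_string
-- ===== SOURCE B (Python) =====
-- def put_together(inp: str) -> str:
--     # Count every character in one pass, then emit each target character's
--     # occurrences in the fixed priority order.
--     counts = {}
--     for ch in inp:
--         counts[ch] = counts.get(ch, 0) + 1
--     return ''.join(c * counts.get(c, 0) for c in "1acw2gdm")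
-- ===== Notes on version B (the rewrite author's own statement) =====
-- stated objective: faster
-- what changed: B builds a character-count dictionary in a single pass and emits each target character's repetitions from it, instead of A's eight full re-scans of the string (each rebuilding the string by repeated slicing).
import Mathlib
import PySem

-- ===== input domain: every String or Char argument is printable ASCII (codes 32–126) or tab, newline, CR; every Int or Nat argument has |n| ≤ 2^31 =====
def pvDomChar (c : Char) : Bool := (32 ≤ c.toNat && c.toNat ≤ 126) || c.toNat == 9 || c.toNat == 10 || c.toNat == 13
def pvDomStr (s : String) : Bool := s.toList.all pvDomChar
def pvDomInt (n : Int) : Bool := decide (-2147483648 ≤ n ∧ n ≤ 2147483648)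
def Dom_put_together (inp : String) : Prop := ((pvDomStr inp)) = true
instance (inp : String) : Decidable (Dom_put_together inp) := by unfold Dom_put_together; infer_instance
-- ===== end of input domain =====

-- B replaces A's eight full scans (each re-slicing the string step by step) with one
-- counting pass over the string plus a fixed-order emission of the eight target chars.

-- ===== PORT A =====
-- One of A's eight identical loops: 'for i in range(n): if string_check[0]==c: new+=...; string_check = string_check[1:]'.
-- State is (new_string, string_check); the loop body never sees an empty string_check
-- (the [] branch is the IndexError case of string_check[0], unreachable since the loop
-- runs exactly len(inp) times starting from inp).
def pvStepA (c : Char) (st : List Char × List Char) : List Char × List Char :=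
  match st with
  | (new, []) => (new, [])
  | (new, x :: rest) => (if x == c then new ++ [x] else new, rest)

def pvLoopA (c : Char) (inp : List Char) (new : List Char) : List Char :=
  ((PySem.List.pyRange 0 (inp.length : Int) 1).foldl (fun st _ => pvStepA c st) (new, inp)).1

def put_together (inp : String) : String :=
  let l := inp.toList
  if l = [] then ""
  else
    let s1 := pvLoopA '1' l []
    let s2 := pvLoopA 'a' l s1
    let s3 := pvLoopA 'c' l s2
    let s4 := pvLoopA 'w' l s3
    let s5 := pvLoopA '2' l s4
    let s6 := pvLoopA 'g' l s5
    let s7 := pvLoopA 'd' l s6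
    let s8 := pvLoopA 'm' l s7
    String.mk s8

-- ===== PORT B =====
def put_together_alt (inp : String) : String :=
  let counts := inp.toList.foldl
    (fun d ch => PySem.Dict.insert d ch (PySem.Dict.getD d ch 0 + 1))
    (PySem.Dict.empty : PySem.Dict Char Int)
  String.mk (("1acw2gdm".toList).flatMap
    (fun c => List.replicate (PySem.Dict.getD counts c 0).toNat c))

-- ===== PRECONDITION & SPEC =====
def Spec_put_together (inp : String) (out : String) : Prop := out = put_together_alt inp
instance (inp : String) (out : String) : Decidable (Spec_put_together inp out) := by unfold Spec_put_together; infer_instance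

-- ===== CLAIM (what is proved, stated in full; the proofs are below) =====
def Claim_equal_put_together : Prop := ∀ (inp : String), Dom_put_together inp → Spec_put_together inp (put_together inp)

-- ===== LEMMAS AND PROOFS =====

theorem pv_foldl_ignore {α σ : Type} (f : σ → σ) :
    ∀ (xs : List α) (s : σ), xs.foldl (fun a _ => f a) s = f^[xs.length] s := by
  intro xs
  induction xs with
  | nil => intro s; rfl
  | cons x xs ih =>
      intro s
      simp [List.foldl_cons, ih, Function.iterate_succ_apply]

theorem pv_iter_stepA (c : Char) :
    ∀ (chk new : List Char),
      (pvStepA c)^[chk.length] (new, chk) = (new ++ chk.filter (· == c), []) := by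
  intro chk
  induction chk with
  | nil => intro new; simp
  | cons x rest ih =>
      intro new
      rw [List.length_cons, Function.iterate_succ_apply]
      by_cases h : x == c
      · simp [pvStepA, h, ih]
      · simp [pvStepA, h, ih]

theorem pvLoopA_eq (c : Char) (l new : List Char) :
    pvLoopA c l new = new ++ l.filter (· == c) := by
  unfold pvLoopA
  rw [pv_foldl_ignore]
  rw [show ((PySem.List.pyRange 0 (l.length : Int) 1).length) = l.length by
        simp [PySem.List.length_pyRange_one]]
  rw [pv_iter_stepA]

theorem pv_counts_getD (l : List Char) (c : Char) :
    PySem.Dict.getD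
      (l.foldl (fun d ch => PySem.Dict.insert d ch (PySem.Dict.getD d ch 0 + 1))
        (PySem.Dict.empty : PySem.Dict Char Int)) c 0 = (l.count c : Int) := by
  rw [PySem.Dict.getD_foldl_insert_add_one]
  simp

theorem pv_block (l : List Char) (c : Char) :
    List.replicate ((l.count c : Int)).toNat c = l.filter (· == c) := by
  rw [Int.toNat_natCast]
  exact (List.filter_beq c).symm

-- ===== VERDICT (by name: the statement is the Claim_ definition above) =====
theorem put_together_spec : Claim_equal_put_together := by
  unfold Claim_equal_put_together
  intro inp _
  unfold Spec_put_together put_together put_together_alt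
  simp only [pvLoopA_eq, pv_counts_getD, pv_block]
  by_cases h : inp.toList = []
  · simp [h]; rfl
  · simp only [h, List.flatMap]
    simp [List.append_assoc]
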